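-- pv_equiv track=rewrite | github.com/SunsetHe/smart_city-location_based_service | 实验二/utils/util.py | get_major_point_index
-- ===== SOURCE A (Python) =====
-- def get_major_point_index(directions):
--     directions_cmp = [directions[0]] + directions[:-1]
--     red_index = []
--     for i, item in enumerate(directions):
--         if i == len(directions) - 1:
--             continue
--         if abs(item - directions_cmp[i]) < 15 and abs(directions[i + 1] - item) < 15:
--             red_index.append(i)
--     return red_index
-- ===== SOURCE B (Python) =====
-- def get_major_point_index(directions):
--     n = len(directions)
--     red = []
--     j = 0
--     while j < n - 1:
--         if abs(directions[j + 1] - directions[j]) < 15: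
--             s = j
--             j += 1
--             while j < n - 1 and abs(directions[j + 1] - directions[j]) < 15:
--                 j += 1
--             start = s if s == 0 else s + 1
--             red.extend(range(start, j))
--         else:
--             j += 1
--     return red
-- ===== Notes on version B (the rewrite author's own statement) =====
-- stated objective: alternative
-- what changed: Replaced A's per-index test against a shifted copy by run-length segmentation: an outer/inner while-loop pair finds each maximal run of consecutive small gaps and emits a whole contiguous index range per run (the run's interior plus its start only when the run starts at index 0).
import Mathlib
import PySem

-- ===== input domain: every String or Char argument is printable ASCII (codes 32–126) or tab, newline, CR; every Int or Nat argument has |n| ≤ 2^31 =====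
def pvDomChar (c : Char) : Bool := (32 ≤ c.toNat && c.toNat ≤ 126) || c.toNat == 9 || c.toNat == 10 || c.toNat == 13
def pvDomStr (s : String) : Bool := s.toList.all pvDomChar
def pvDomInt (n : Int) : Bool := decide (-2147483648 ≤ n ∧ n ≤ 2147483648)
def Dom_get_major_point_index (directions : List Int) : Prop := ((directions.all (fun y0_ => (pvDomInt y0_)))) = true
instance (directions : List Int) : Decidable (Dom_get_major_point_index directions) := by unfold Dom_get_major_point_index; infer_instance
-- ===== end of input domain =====

-- B replaces A's shifted-copy per-index pass by run-length segmentation: nested while loops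
-- find each maximal run of small consecutive gaps and emit one contiguous index range per run
-- (objective: alternative, same cost). A raises IndexError on []; B returns []; Pre_ excludes [].

-- ===== PORT A =====
def get_major_point_index (directions : List Int) : List Int :=
  -- directions_cmp = [first element] + directions[:-1]  (reading the first element raises on the empty list; Pre_ excludes it, the pyGetD default 0 is never reached inside Pre_)
  let directions_cmp := [PySem.List.pyGetD directions 0 0] ++ PySem.List.slice directions none (some (-1))
  (PySem.List.enumerate directions).foldl
    (fun red p =>
      if p.1 = (directions.length : Int) - 1 then red
      else if |p.2 - PySem.List.pyGetD directions_cmp p.1 0| < 15 ∧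
              |PySem.List.pyGetD directions (p.1 + 1) 0 - p.2| < 15 then red ++ [p.1]
      else red) []

-- ===== PORT B =====
-- abs(directions[j+1] - directions[j]) < 15, the gap-at-j test of Source B
def gmpiSmall (d : List Int) (j : Int) : Bool :=
  |PySem.List.pyGetD d (j + 1) 0 - PySem.List.pyGetD d j 0| < 15

-- the inner 'while j < n - 1 and <small gap>: j += 1' loop of Source B, returning the final j
def gmpiInner (d : List Int) (j : Int) : Int :=
  if j < (d.length : Int) - 1 ∧ gmpiSmall d j then gmpiInner d (j + 1) else j
termination_by ((d.length : Int) - 1 - j).toNat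
decreasing_by omega

theorem gmpiInner_ge (d : List Int) (j : Int) : j ≤ gmpiInner d j := by
  fun_induction gmpiInner with
  | case1 j h ih => omega
  | case2 j h => omega

-- the outer while loop of Source B; red.extend(range(start, j)) becomes appending pyRange start j'
def gmpiOuter (d : List Int) (j : Int) : List Int :=
  if hj : j < (d.length : Int) - 1 then
    if gmpiSmall d j then
      let s := j
      let j' := gmpiInner d (j + 1)
      let start := if s = 0 then s else s + 1
      PySem.List.pyRange start j' ++ gmpiOuter d j'
    else gmpiOuter d (j + 1)
  else []
termination_by ((d.length : Int) - 1 - j).toNat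
decreasing_by
  · have := gmpiInner_ge d (j + 1); omega
  · omega

def get_major_point_index_alt (directions : List Int) : List Int :=
  gmpiOuter directions 0

-- ===== PRECONDITION & SPEC =====
-- Pre_ excludes only the empty list, on which A raises IndexError reading the first element before its loop.
def Pre_get_major_point_index (directions : List Int) : Prop := directions ≠ []
instance (directions : List Int) : Decidable (Pre_get_major_point_index directions) := by unfold Pre_get_major_point_index; infer_instance
def pvWitness_get_major_point_index : List Int := [3, 5, 40, 41]

def Spec_get_major_point_index (directions : List Int) (out : List Int) : Prop := out = get_major_point_index_alt directions
instance (directions : List Int) (out : List Int) : Decidable (Spec_get_major_point_index directions out) := by unfold Spec_get_major_point_index; infer_instance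

-- ===== CLAIM (what is proved, stated in full; the proofs are below) =====
def Claim_equal_get_major_point_index : Prop := ∀ (directions : List Int), Dom_get_major_point_index directions → Pre_get_major_point_index directions → Spec_get_major_point_index directions (get_major_point_index directions)

-- ===== LEMMAS AND PROOFS =====

-- the common specification both ports are reduced to: a filter over all candidate indices
def gmpiP (d : List Int) (i : Int) : Bool :=
  gmpiSmall d i && (i == 0 || gmpiSmall d (i - 1))

-- characterisation of the inner while loop
theorem gmpiInner_spec (d : List Int) (j : Int) :
    (∀ m, j ≤ m → m < gmpiInner d j → m < (d.length : Int) - 1 ∧ gmpiSmall d m = true) ∧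
    (gmpiInner d j < (d.length : Int) - 1 → gmpiSmall d (gmpiInner d j) = false) := by
  fun_induction gmpiInner with
  | case1 j h ih =>
    refine ⟨?_, ih.2⟩
    intro m hm1 hm2
    rcases eq_or_lt_of_le hm1 with rfl | h'
    · exact ⟨h.1, h.2⟩
    · exact ih.1 m (by omega) hm2
  | case2 j h =>
    constructor
    · intro m hm1 hm2; omega
    · intro hlt
      by_cases hs : gmpiSmall d j = true
      · exact absurd ⟨hlt, hs⟩ h
      · simpa using hs

theorem gmpiInner_le (d : List Int) (j : Int) (h : j ≤ (d.length : Int) - 1) :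
    gmpiInner d j ≤ (d.length : Int) - 1 := by
  have hge := gmpiInner_ge d j
  rcases eq_or_lt_of_le hge with heq | hlt
  · omega
  · have := (gmpiInner_spec d j).1 (gmpiInner d j - 1) (by omega) (by omega)
    omega

-- the outer loop computes the filter of the candidate range, under the loop invariant
theorem gmpiOuter_filter (d : List Int) (k : Nat) : ∀ (j : Int),
    (((d.length : Int) - 1 - j)).toNat ≤ k → 0 ≤ j →
    ((d.length : Int) - 1 ≤ j ∨ j = 0 ∨ gmpiSmall d (j - 1) = false ∨ gmpiSmall d j = false) →
    gmpiOuter d j = (PySem.List.pyRange j ((d.length : Int) - 1)).filter (gmpiP d) := by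
  induction k with
  | zero =>
    intro j hk h0 hinv
    rw [gmpiOuter]
    rw [dif_neg (by omega)]
    rw [PySem.List.pyRange_one_eq_nil (by omega)]
    simp
  | succ k ih =>
    intro j hk h0 hinv
    rw [gmpiOuter]
    by_cases hj : j < (d.length : Int) - 1
    · rw [dif_pos hj]
      by_cases hs : gmpiSmall d j
      · rw [if_pos hs]
        simp only []
        set n1 : Int := (d.length : Int) - 1 with hn1
        set j' := gmpiInner d (j + 1) with hj'
        have hj'ge : j + 1 ≤ j' := gmpiInner_ge d (j + 1)
        have hj'le : j' ≤ n1 := gmpiInner_le d (j + 1) (by omega)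
        have hrun : ∀ m, j + 1 ≤ m → m < j' → gmpiSmall d m = true :=
          fun m h1 h2 => ((gmpiInner_spec d (j + 1)).1 m h1 h2).2
        have hstop : j' < n1 → gmpiSmall d j' = false := (gmpiInner_spec d (j + 1)).2
        -- split the candidate range at j'
        rw [PySem.List.pyRange_one_append j j' n1 (by omega) hj'le]
        rw [List.filter_append]
        -- tail: recursive call
        have htail : gmpiOuter d j' = (PySem.List.pyRange j' n1).filter (gmpiP d) := by
          apply ih j' (by omega) (by omega)
          by_cases h' : j' < n1
          · right; right; right; exact hstop h'
          · left; omega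
        rw [htail]
        congr 1
        -- head: filter of the run range equals pyRange start j'
        have hall : (PySem.List.pyRange (j + 1) j').filter (gmpiP d) = PySem.List.pyRange (j + 1) j' := by
          apply List.filter_eq_self.mpr
          intro m hm
          rcases PySem.List.mem_pyRange_one.mp hm with ⟨hm1, hm2⟩
          have hsm : gmpiSmall d m = true := hrun m hm1 hm2
          have hsm1 : gmpiSmall d (m - 1) = true := by
            rcases eq_or_lt_of_le hm1 with heq | hlt
            · rw [show m - 1 = j by omega]; exact hs
            · exact hrun (m - 1) (by omega) (by omega)
          simp [gmpiP, hsm, hsm1]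
        rw [show PySem.List.pyRange j j' = j :: PySem.List.pyRange (j + 1) j' from
              PySem.List.pyRange_one_cons (by omega)]
        rw [List.filter_cons, hall]
        by_cases hj0 : j = 0
        · subst hj0
          have hp : gmpiP d 0 = true := by simp [gmpiP, hs]
          rw [if_pos rfl]
          simp only [hp, if_true]
          exact (show PySem.List.pyRange 0 j' = 0 :: PySem.List.pyRange (0 + 1) j' from
                  PySem.List.pyRange_one_cons (by omega))
        · have hprev : gmpiSmall d (j - 1) = false := by
            rcases hinv with h | h | h | h
            · omega
            · exact absurd h hj0
            · exact h
            · rw [h] at hs; exact absurd hs (by simp)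
          have hp : gmpiP d j = false := by
            simp [gmpiP, hs, hprev, hj0]
          rw [if_neg hj0]
          simp only [hp]
          simp
      · rw [if_neg hs]
        have hsf : gmpiSmall d j = false := by simpa using hs
        rw [ih (j + 1) (by omega) (by omega) (by right; right; left; simpa using hsf)]
        rw [show PySem.List.pyRange j ((d.length : Int) - 1) =
              j :: PySem.List.pyRange (j + 1) ((d.length : Int) - 1) from
              PySem.List.pyRange_one_cons (by omega)]
        rw [List.filter_cons]
        have hp : gmpiP d j = false := by simp [gmpiP, hsf]
        simp only [hp]
        simp
    · rw [dif_neg hj]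
      rw [PySem.List.pyRange_one_eq_nil (by omega)]
      simp

-- A also computes the filter of the candidate range
theorem gmpiA_filter (d : List Int) (hd : d ≠ []) :
    get_major_point_index d = (PySem.List.pyRange 0 ((d.length : Int) - 1)).filter (gmpiP d) := by
  have hn : 1 ≤ (d.length : Int) := by
    have := List.length_pos_iff.mpr hd; omega
  unfold get_major_point_index
  simp only []
  rw [PySem.List.enumerate_eq_map_pyRange d 0, List.foldl_map]
  rw [show PySem.List.len d = (d.length : Int) from by simp [PySem.List.len]]
  rw [PySem.List.pyRange_one_append 0 ((d.length : Int) - 1) (d.length) (by omega) (by omega)]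
  rw [show (PySem.List.pyRange ((d.length : Int) - 1) (d.length)) = [(d.length : Int) - 1] from by
        have := PySem.List.pyRange_one_singleton ((d.length : Int) - 1); simpa using this]
  rw [List.foldl_append]
  simp only [List.foldl_cons, List.foldl_nil]
  rw [PySem.List.foldl_congr_mem _ _
      (fun red j => if (|PySem.List.pyGetD d j 0 - PySem.List.pyGetD ([PySem.List.pyGetD d 0 0] ++ PySem.List.slice d none (some (-1))) j 0| < 15 ∧
              |PySem.List.pyGetD d (j + 1) 0 - PySem.List.pyGetD d j 0| < 15) then red ++ [j] else red) []
      (by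
        intro acc x hx
        rcases PySem.List.mem_pyRange_one.mp hx with ⟨h0, h1⟩
        simp only
        rw [if_neg (by omega)])]
  rw [PySem.List.foldl_append_ite_eq_filter]
  simp only [List.nil_append]
  apply List.filter_congr
  intro j hj
  rcases PySem.List.mem_pyRange_one.mp hj with ⟨h0, h1⟩
  by_cases hj0 : j = 0
  · subst hj0
    have hc : PySem.List.pyGetD ([PySem.List.pyGetD d 0 0] ++ PySem.List.slice d none (some (-1))) 0 0 = PySem.List.pyGetD d 0 0 := by
      simp [PySem.List.pyGetD, PySem.List.pyIdx?, PySem.List.pyGet?]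
    rw [hc]
    simp [gmpiP, gmpiSmall]
  · have hc : PySem.List.pyGetD ([PySem.List.pyGetD d 0 0] ++ PySem.List.slice d none (some (-1))) j 0 = PySem.List.pyGetD d (j - 1) 0 := by
      rw [PySem.List.slice_to_neg_one]
      rw [PySem.List.pyGetD_eq_getElem _ _ h0 (by simp [List.length_dropLast]; omega)]
      rw [PySem.List.pyGetD_eq_getElem _ _ (by omega : (0:Int) ≤ j - 1) (by omega)]
      rw [List.getElem_append_right (by simp; omega)]
      rw [List.getElem_dropLast]
      congr 1
      simp
    rw [hc]
    simp only [gmpiP, gmpiSmall]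
    rw [show j - 1 + 1 = j from by omega]
    by_cases hA : |PySem.List.pyGetD d j 0 - PySem.List.pyGetD d (j - 1) 0| < 15 <;>
      by_cases hB : |PySem.List.pyGetD d (j + 1) 0 - PySem.List.pyGetD d j 0| < 15 <;>
        simp [hA, hB, hj0]

-- ===== VERDICT (by name: the statement is the Claim_ definition above) =====
theorem get_major_point_index_spec : Claim_equal_get_major_point_index := by
  intro d _ hpre
  unfold Spec_get_major_point_index get_major_point_index_alt
  rw [gmpiA_filter d hpre]
  rw [gmpiOuter_filter d (((d.length : Int) - 1)).toNat 0 (by omega) (by omega) (by right; left; rfl)]
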